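-- pv_equiv track=rewrite | github.com/pypi-data/pypi-mirror-40 | packages/PackageMega/PackageMega-0.1.3.tar.gz/PackageMega-0.1.3/packagemega/mini_language.py | _filePrefix
-- ===== SOURCE A (Python) =====
-- def _filePrefix(fs):
--     out = ''
--     ls = [len(fpath) for fpath in fs.values()]
--     for i in range(min(ls)):
--         cs = [fpath[i] for fpath in fs.values()]
--         consensus = True
--         for j in range(len(cs) - 1):
--             if cs[j] != cs[j + 1]:
--                 consensus = False
--                 break
--         if consensus:
--             out += cs[0]
--         else:
--             break
--     if out[-1] == '.':
--         out = out[:-1]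
--     return out
-- ===== SOURCE B (Python) =====
-- def _lcp2(x, y):
--     k = 0
--     while k < len(x) and k < len(y) and x[k] == y[k]:
--         k += 1
--     return x[:k]
--
--
-- def _filePrefix(fs):
--     vals = list(fs.values())
--     out = vals[0]
--     for v in vals[1:]:
--         out = _lcp2(out, v)
--     if out[-1] == '.':
--         out = out[:-1]
--     return out
-- ===== Notes on version B (the rewrite author's own statement) =====
-- stated objective: simpler
-- what changed: A scans column-by-column, rebuilding the full character column and running an adjacent-pairs consensus loop for every index; B folds a pairwise longest-common-prefix helper over the values once (row-wise, one string at a time), which is shorter and avoids re-walking all values per character.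
-- outside the precondition, e.g. on _filePrefix({}): A raises ValueError, B raises IndexError
import Mathlib
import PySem

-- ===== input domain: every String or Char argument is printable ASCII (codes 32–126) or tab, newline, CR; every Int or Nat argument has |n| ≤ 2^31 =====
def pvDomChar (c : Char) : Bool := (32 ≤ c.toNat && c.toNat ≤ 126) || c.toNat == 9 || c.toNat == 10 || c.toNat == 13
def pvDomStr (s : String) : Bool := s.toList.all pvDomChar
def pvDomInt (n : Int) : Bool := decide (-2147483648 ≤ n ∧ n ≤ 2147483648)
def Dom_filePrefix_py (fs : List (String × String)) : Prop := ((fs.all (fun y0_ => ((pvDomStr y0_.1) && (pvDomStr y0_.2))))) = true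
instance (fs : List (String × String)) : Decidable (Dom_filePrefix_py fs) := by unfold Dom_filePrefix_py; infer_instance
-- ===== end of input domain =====

-- B replaces A's column-by-column consensus scan with a single fold of a pairwise
-- longest-common-prefix helper over the dict values (objective: simpler).

-- ===== PORT A =====
-- inner loop 'for j in range(len(cs)-1): if cs[j] != cs[j+1]: consensus=False; break'
def consensusA : List Char → Bool
  | a :: b :: t => if a ≠ b then false else consensusA (b :: t)
  | _ => true

-- the 'for i in range(min(ls))' loop; fuel = number of remaining indices, i the current index.
-- i < every value's length throughout (fuel starts at min(ls)), so 'fpath[i]' is total: getD is exact here.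
def goA (vals : List (List Char)) : Nat → Nat → List Char → List Char
  | _, 0, out => out
  | i, fuel + 1, out =>
    let cs := vals.map (fun v => v.getD i ' ')
    if consensusA cs then goA vals (i + 1) fuel (out ++ [cs.headD ' ']) else out

def filePrefix_py (fs : List (String × String)) : String :=
  let vals := ((PySem.Dict.ofList fs).values).map String.toList
  let ls := vals.map List.length
  match PySem.List.min? ls (fun x => x) with
  | none => ""          -- min([]) raises ValueError in Python: outside Pre_
  | some m =>
    let out := goA vals 0 m []
    -- 'if out[-1] == '.': out = out[:-1]'; out[-1] on empty out raises IndexError: outside Pre_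
    if PySem.List.pyGet? out (-1) = some '.' then String.ofList out.dropLast else String.ofList out

-- ===== PORT B =====
-- the while loop of _lcp2: count matching positions k, then x[:k]
def matchLen : List Char → List Char → Nat
  | a :: s, b :: t => if a = b then matchLen s t + 1 else 0
  | _, _ => 0

def lcp2 (x y : List Char) : List Char := x.take (matchLen x y)

def filePrefix_py_alt (fs : List (String × String)) : String :=
  let vals := ((PySem.Dict.ofList fs).values).map String.toList
  -- 'out = vals[0]' raises IndexError on empty fs: outside Pre_
  let out := (vals.drop 1).foldl lcp2 (vals.headD [])
  if PySem.List.pyGet? out (-1) = some '.' then String.ofList out.dropLast else String.ofList out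

-- ===== PRECONDITION & SPEC =====
-- Pre_ excludes exactly the inputs where A raises: the empty dict (min([]) → ValueError) and
-- inputs whose values do not all start with one common character (empty prefix → out[-1] IndexError).
def Pre_filePrefix_py (fs : List (String × String)) : Prop :=
  let vals := ((PySem.Dict.ofList fs).values).map String.toList
  vals ≠ [] ∧ vals.headD [] ≠ [] ∧ ∀ v ∈ vals, v.head? = (vals.headD []).head?
instance (fs : List (String × String)) : Decidable (Pre_filePrefix_py fs) := by
  unfold Pre_filePrefix_py; infer_instance

def pvWitness_filePrefix_py : (List (String × String)) := [("a", "x.y"), ("b", "x.z")]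

def Spec_filePrefix_py (fs : List (String × String)) (out : String) : Prop := out = filePrefix_py_alt fs
instance (fs : List (String × String)) (out : String) : Decidable (Spec_filePrefix_py fs out) := by
  unfold Spec_filePrefix_py; infer_instance

-- ===== CLAIM (what is proved, stated in full; the proofs are below) =====
def Claim_equal_filePrefix_py : Prop := ∀ (fs : List (String × String)), Dom_filePrefix_py fs → Pre_filePrefix_py fs → Spec_filePrefix_py fs (filePrefix_py fs)

-- ===== LEMMAS AND PROOFS =====

theorem matchLen_le_left (x y : List Char) : matchLen x y ≤ x.length := by
  induction x generalizing y with
  | nil => cases y <;> simp [matchLen]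
  | cons a s ih =>
    cases y with
    | nil => simp [matchLen]
    | cons b t =>
      by_cases h : a = b <;> simp [matchLen, h]
      exact ih t

theorem matchLen_le_right (x y : List Char) : matchLen x y ≤ y.length := by
  induction x generalizing y with
  | nil => cases y <;> simp [matchLen]
  | cons a s ih =>
    cases y with
    | nil => simp [matchLen]
    | cons b t =>
      by_cases h : a = b <;> simp [matchLen, h]
      exact ih t

theorem matchLen_take (j : Nat) (x y : List Char) :
    matchLen (x.take j) y = min j (matchLen x y) := by
  induction x generalizing j y with
  | nil => cases y <;> simp [matchLen]
  | cons a s ih =>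
    cases j with
    | zero => cases y <;> simp [matchLen]
    | succ j =>
      cases y with
      | nil => simp [matchLen]
      | cons b t =>
        by_cases h : a = b <;> simp [matchLen, h, ih, Nat.succ_min_succ]

theorem lcp2_take (v0 : List Char) (j : Nat) (v : List Char) :
    lcp2 (v0.take j) v = v0.take (min j (matchLen v0 v)) := by
  simp only [lcp2, matchLen_take, List.take_take]
  congr 1
  omega

-- B's fold, with the accumulator always a prefix of the first value
theorem foldl_lcp2_take (v0 : List Char) (rest : List (List Char)) :
    ∀ j, rest.foldl lcp2 (v0.take j) =
      v0.take (rest.foldl (fun a v => min a (matchLen v0 v)) j) := by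
  induction rest with
  | nil => intro j; simp
  | cons v rest ih =>
    intro j
    simp only [List.foldl_cons, lcp2_take, ih]

-- A's consensus check over a column: all values agree with the first value at index i
theorem consensusA_map (v0 : List Char) (rest : List (List Char)) (i : Nat) :
    consensusA ((v0 :: rest).map (fun v => v.getD i ' ')) = true ↔
      ∀ v ∈ rest, v.getD i ' ' = v0.getD i ' ' := by
  induction rest generalizing v0 with
  | nil => simp [consensusA]
  | cons w rest ih =>
    simp only [List.map_cons, consensusA]
    by_cases h : v0.getD i ' ' = w.getD i ' '
    · rw [if_neg (fun hx => hx h)]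
      rw [show (w.getD i ' ' :: rest.map (fun v => v.getD i ' ')) =
        ((w :: rest).map (fun v => v.getD i ' ')) from rfl]
      rw [ih w]
      constructor
      · intro hc v hv
        rcases List.mem_cons.mp hv with hv | hv
        · subst hv; exact h.symm
        · rw [hc v hv, ← h]
      · intro hall v hv
        rw [hall v (List.mem_cons_of_mem _ hv), h]
    · rw [if_pos h]
      constructor
      · intro hc; cases hc
      · intro hall; exact absurd (hall w List.mem_cons_self).symm h

-- number of consensus columns A's loop takes, starting at index i with given fuel
def aCount (vals : List (List Char)) : Nat → Nat → Nat
  | _, 0 => 0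
  | i, fuel + 1 =>
    if consensusA (vals.map (fun v => v.getD i ' ')) then aCount vals (i + 1) fuel + 1 else 0

theorem goA_eq_take (v0 : List Char) (rest : List (List Char)) :
    ∀ fuel i out, i + fuel ≤ v0.length →
      goA (v0 :: rest) i fuel out = out ++ (v0.drop i).take (aCount (v0 :: rest) i fuel) := by
  intro fuel
  induction fuel with
  | zero => intro i out h; simp [goA, aCount]
  | succ fuel ih =>
    intro i out h
    rw [goA, aCount]
    by_cases hc : consensusA ((v0 :: rest).map (fun v => v.getD i ' ')) = true
    · rw [if_pos hc, if_pos hc, ih (i + 1) _ (by omega)]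
      have hi : i < v0.length := by omega
      have hdrop : v0.drop i = v0[i] :: v0.drop (i + 1) := List.drop_eq_getElem_cons hi
      have hhead : (((v0 :: rest).map (fun v => v.getD i ' ')).headD ' ') = v0[i] := by
        simp [List.getD, hi]
      rw [hhead, hdrop, List.take_succ_cons]
      simp
    · rw [if_neg hc, if_neg hc]
      simp

-- generic facts about the running-min fold
theorem foldl_min_zero (g : List Char → Nat) (rest : List (List Char)) :
    rest.foldl (fun a v => min a (g v)) 0 = 0 := by
  induction rest with
  | nil => rfl
  | cons v rest ih => simpa using ih

theorem foldl_min_succ (g h : List Char → Nat) (rest : List (List Char))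
    (hgh : ∀ v ∈ rest, h v = g v + 1) :
    ∀ f, rest.foldl (fun a v => min a (h v)) (f + 1) =
      rest.foldl (fun a v => min a (g v)) f + 1 := by
  induction rest with
  | nil => intro f; rfl
  | cons v rest ih =>
    intro f
    simp only [List.foldl_cons]
    rw [hgh v List.mem_cons_self, Nat.succ_min_succ]
    exact ih (fun w hw => hgh w (List.mem_cons_of_mem _ hw)) _

theorem foldl_min_eq_zero (g : List Char → Nat) (rest : List (List Char))
    (v : List Char) (hv : v ∈ rest) (h0 : g v = 0) :
    ∀ f, rest.foldl (fun a v => min a (g v)) f = 0 := by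
  induction rest with
  | nil => cases hv
  | cons w rest ih =>
    intro f
    simp only [List.foldl_cons]
    rcases List.mem_cons.mp hv with h | h
    · subst h; rw [h0]; simp [foldl_min_zero]
    · exact ih h _

theorem foldl_min_min (g : List Char → Nat) (rest : List (List Char)) :
    ∀ a b, rest.foldl (fun x v => min x (g v)) (min a b) =
      min a (rest.foldl (fun x v => min x (g v)) b) := by
  induction rest with
  | nil => intro a b; rfl
  | cons w ws ih =>
    intro a b
    simp only [List.foldl_cons]
    rw [Nat.min_assoc, ih]

theorem foldl_min_le_seed (g : List Char → Nat) (rest : List (List Char)) :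
    ∀ f, rest.foldl (fun x v => min x (g v)) f ≤ f := by
  induction rest with
  | nil => intro f; exact le_refl f
  | cons w ws ih =>
    intro f
    simp only [List.foldl_cons]
    exact le_trans (ih _) (Nat.min_le_left _ _)

theorem foldl_min_le_elem (g : List Char → Nat) (rest : List (List Char)) :
    ∀ f v, v ∈ rest → rest.foldl (fun x v => min x (g v)) f ≤ g v := by
  induction rest with
  | nil => intro f v hv; cases hv
  | cons w ws ih =>
    intro f v hv
    simp only [List.foldl_cons]
    rcases List.mem_cons.mp hv with h | h
    · subst h; exact le_trans (foldl_min_le_seed _ _ _) (Nat.min_le_right _ _)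
    · exact ih _ v h

-- A's column count equals the min-fold of matchLens (seeded with the fuel)
theorem aCount_eq (v0 : List Char) (rest : List (List Char)) :
    ∀ fuel i, (∀ v ∈ v0 :: rest, i + fuel ≤ v.length) →
      aCount (v0 :: rest) i fuel =
        rest.foldl (fun a v => min a (matchLen (v0.drop i) (v.drop i))) fuel := by
  intro fuel
  induction fuel with
  | zero => intro i h; simp [aCount, foldl_min_zero]
  | succ fuel ih =>
    intro i h
    rw [aCount]
    have hi0 : i < v0.length := by
      have := h v0 List.mem_cons_self; omega
    by_cases hc : consensusA ((v0 :: rest).map (fun v => v.getD i ' ')) = true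
    · rw [if_pos hc, ih (i + 1) (fun v hv => by have := h v hv; omega)]
      have hall := (consensusA_map v0 rest i).mp hc
      refine (foldl_min_succ _ _ rest ?_ fuel).symm
      intro v hv
      have hiv : i < v.length := by
        have := h v (List.mem_cons_of_mem _ hv); omega
      have heq : v[i] = v0[i] := by
        have := hall v hv
        simpa [List.getD, List.getElem?_eq_getElem, hiv, hi0] using this
      rw [List.drop_eq_getElem_cons hiv, List.drop_eq_getElem_cons hi0, heq, matchLen]
      simp
    · rw [if_neg hc]
      rw [consensusA_map v0 rest i] at hc
      push Not at hc
      obtain ⟨v, hv, hne⟩ := hc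
      have hiv : i < v.length := by
        have := h v (List.mem_cons_of_mem _ hv); omega
      refine (foldl_min_eq_zero _ rest v hv ?_ _).symm
      have hne' : ¬ v[i] = v0[i] := by
        simpa [List.getD, List.getElem?_eq_getElem, hiv, hi0] using hne
      rw [List.drop_eq_getElem_cons hiv, List.drop_eq_getElem_cons hi0, matchLen, if_neg (fun he => hne' he.symm)]

-- the central equality on the shared values list (before the trailing-dot trim)
theorem core_eq (vals : List (List Char)) (hne : vals ≠ []) :
    ∃ m, PySem.List.min? (vals.map List.length) (fun x => x) = some m ∧
      goA vals 0 m [] = (vals.drop 1).foldl lcp2 (vals.headD []) := by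
  obtain ⟨v0, rest, rfl⟩ := List.exists_cons_of_ne_nil hne
  obtain ⟨m, hm⟩ : ∃ m, PySem.List.min? ((v0 :: rest).map List.length) (fun x => x) = some m := by
    cases hmm : PySem.List.min? ((v0 :: rest).map List.length) (fun x => x) with
    | none =>
      rw [PySem.List.min?_eq_none_iff] at hmm
      simp at hmm
    | some m => exact ⟨m, rfl⟩
  refine ⟨m, hm, ?_⟩
  have hmem := PySem.List.min?_mem hm
  have hle' : ∀ v ∈ (v0 :: rest), m ≤ v.length := by
    intro v hv
    have := PySem.List.min?_isMin hm (v.length) (List.mem_map_of_mem hv)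
    exact this
  have hm0 : m ≤ v0.length := hle' v0 List.mem_cons_self
  simp only [List.headD_cons, List.drop_one, List.tail_cons]
  rw [goA_eq_take v0 rest m 0 [] (by omega)]
  rw [aCount_eq v0 rest m 0 (fun v hv => by simpa using hle' v hv)]
  simp only [List.drop_zero, List.nil_append]
  have hB : rest.foldl lcp2 v0 =
      v0.take (rest.foldl (fun a v => min a (matchLen v0 v)) v0.length) := by
    have := foldl_lcp2_take v0 rest v0.length
    rwa [List.take_of_length_le (le_refl _)] at this
  rw [hB]
  -- both seeds dominate the true minimum of the matchLens, so the takes agree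
  cases rest with
  | nil =>
    simp only [List.foldl_nil]
    have : m = v0.length := by simpa using hmem
    rw [this]
  | cons w ws =>
    simp only [List.foldl_cons]
    have hsplit : ∀ s : Nat, ws.foldl (fun a v => min a (matchLen v0 v)) (min s (matchLen v0 w)) =
        min s (ws.foldl (fun a v => min a (matchLen v0 v)) (matchLen v0 w)) :=
      fun s => foldl_min_min _ ws s (matchLen v0 w)
    rw [hsplit m, hsplit v0.length]
    set F := ws.foldl (fun a v => min a (matchLen v0 v)) (matchLen v0 w) with hF
    have hFw : F ≤ matchLen v0 w := foldl_min_le_seed _ _ _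
    have hFv : ∀ v ∈ ws, F ≤ matchLen v0 v := fun v hv => foldl_min_le_elem _ _ _ v hv
    have hFm : F ≤ m := by
      rcases List.mem_map.mp hmem with ⟨u, hu, hum⟩
      rcases List.mem_cons.mp hu with h | h
      · subst h; rw [← hum]; exact le_trans hFw (matchLen_le_left _ _)
      · rcases List.mem_cons.mp h with h | h
        · subst h; rw [← hum]; exact le_trans hFw (matchLen_le_right _ _)
        · rw [← hum]; exact le_trans (hFv u h) (matchLen_le_right _ _)
    have hFl : F ≤ v0.length := le_trans hFw (matchLen_le_left _ _)
    rw [Nat.min_eq_right hFm, Nat.min_eq_right hFl]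

-- ===== VERDICT (by name: the statement is the Claim_ definition above) =====
theorem filePrefix_py_spec : Claim_equal_filePrefix_py := by
  intro fs _ hpre
  unfold Spec_filePrefix_py filePrefix_py filePrefix_py_alt
  obtain ⟨h1, -, -⟩ := hpre
  have hne : ((PySem.Dict.ofList fs).values).map String.toList ≠ [] := h1
  obtain ⟨m, hm, hcore⟩ := core_eq _ hne
  simp only [hm, hcore]
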